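-- pv_equiv track=rewrite | github.com/ammarozkan/possibility-proc | possibility_proc.py | lwdmove_counter
-- ===== SOURCE A (Python) =====
-- def lwdmove_counter(dd):
--     result = {} #"(1,2)":[wincount,losecount,drawcount,continuecount]
--     for d in dd:
--         match d[1]:
--             case "win":
--                 if len(d[0]["moves"]) != 0:
--                     if str(d[0]["moves"][0]) in result: result[str(d[0]["moves"][0])][0]+=1
--                     else : result[str(d[0]["moves"][0])] = [1,0,0,0]
--             case "lose":
--                 if len(d[0]["moves"]) != 0:
--                     if str(d[0]["moves"][0]) in result: result[str(d[0]["moves"][0])][1]+=1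
--                     else : result[str(d[0]["moves"][0])] = [0,1,0,0]
--             case "draw":
--                 if len(d[0]["moves"]) != 0:
--                     if str(d[0]["moves"][0]) in result: result[str(d[0]["moves"][0])][2]+=1
--                     else : result[str(d[0]["moves"][0])] = [0,0,1,0]
--             case "cont":
--                 if len(d[0]["moves"]) != 0:
--                     if str(d[0]["moves"][0]) in result: result[str(d[0]["moves"][0])][3]+=1
--                     else : result[str(d[0]["moves"][0])] = [0,0,0,1]
--     return result
-- ===== SOURCE B (Python) =====
-- def lwdmove_counter(dd):
--     outcomes = ("win", "lose", "draw", "cont")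
--     pairs = [(str(d[0]["moves"][0]), d[1])
--              for d in dd if d[1] in outcomes and len(d[0]["moves"]) != 0]
--     return {k: [sum(1 for p in pairs if p == (k, o)) for o in outcomes]
--             for k in dict.fromkeys(k for k, _ in pairs)}
-- ===== Notes on version B (the rewrite author's own statement) =====
-- stated objective: alternative
-- what changed: Replaces A's single-pass dict accumulation with four match/case branches by a staged pipeline: one comprehension extracts (first-move, outcome) pairs, dict.fromkeys dedups the keys in first-occurrence order, and each count is then computed independently by counting pairs per (key, outcome).
import Mathlib
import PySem

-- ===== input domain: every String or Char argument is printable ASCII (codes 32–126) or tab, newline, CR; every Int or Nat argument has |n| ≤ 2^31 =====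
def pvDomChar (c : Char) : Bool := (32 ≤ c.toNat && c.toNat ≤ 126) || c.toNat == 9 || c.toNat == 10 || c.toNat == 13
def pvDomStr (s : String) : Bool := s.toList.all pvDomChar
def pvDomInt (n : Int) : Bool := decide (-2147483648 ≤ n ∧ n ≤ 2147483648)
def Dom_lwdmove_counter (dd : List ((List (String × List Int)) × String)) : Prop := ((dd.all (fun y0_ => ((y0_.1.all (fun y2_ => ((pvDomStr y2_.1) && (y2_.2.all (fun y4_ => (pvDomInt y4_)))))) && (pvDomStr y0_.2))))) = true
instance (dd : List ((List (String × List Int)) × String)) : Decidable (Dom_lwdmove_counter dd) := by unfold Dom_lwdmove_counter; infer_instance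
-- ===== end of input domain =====

-- B replaces A's single-pass four-branch dict accumulation by a staged pipeline (extract
-- (first-move, outcome) pairs, dedup the keys, count per key and outcome); return-value equivalence.

-- ===== PORT A =====
-- one loop step of A: the four-way match on d[1], each branch its own in/else pair
def lwdStepA (r : PySem.Dict String (List Int)) (d : (List (String × List Int)) × String) :
    PySem.Dict String (List Int) :=
  if d.2 = "win" then
    match (PySem.Dict.mk d.1).getD "moves" [] with      -- d[0]["moves"]; KeyError excluded by Pre_
    | [] => r
    | m :: _ =>
      let k := PySem.Int.toStr m
      if r.contains k then r.modify k [] (fun l => l.set 0 (l.getD 0 0 + 1)) else r.insert k [1,0,0,0]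
  else if d.2 = "lose" then
    match (PySem.Dict.mk d.1).getD "moves" [] with
    | [] => r
    | m :: _ =>
      let k := PySem.Int.toStr m
      if r.contains k then r.modify k [] (fun l => l.set 1 (l.getD 1 0 + 1)) else r.insert k [0,1,0,0]
  else if d.2 = "draw" then
    match (PySem.Dict.mk d.1).getD "moves" [] with
    | [] => r
    | m :: _ =>
      let k := PySem.Int.toStr m
      if r.contains k then r.modify k [] (fun l => l.set 2 (l.getD 2 0 + 1)) else r.insert k [0,0,1,0]
  else if d.2 = "cont" then
    match (PySem.Dict.mk d.1).getD "moves" [] with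
    | [] => r
    | m :: _ =>
      let k := PySem.Int.toStr m
      if r.contains k then r.modify k [] (fun l => l.set 3 (l.getD 3 0 + 1)) else r.insert k [0,0,0,1]
  else r

def lwdmove_counter (dd : List ((List (String × List Int)) × String)) : List (String × List Int) :=
  (dd.foldl lwdStepA PySem.Dict.empty).items

-- ===== PORT B =====
def lwdOutcomes : List String := ["win", "lose", "draw", "cont"]

-- the comprehension: (str(d[0]["moves"][0]), d[1]) for d in dd if d[1] in outcomes and moves nonempty
def lwdPairs (dd : List ((List (String × List Int)) × String)) : List (String × String) :=
  dd.filterMap (fun d =>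
    if d.2 ∈ lwdOutcomes then
      match (PySem.Dict.mk d.1).getD "moves" [] with    -- d[0]["moves"]; KeyError excluded by Pre_
      | [] => none
      | m :: _ => some (PySem.Int.toStr m, d.2)
    else none)

-- the inner list comprehension: the 0/1-sum over pairs IS a count of (k, o)
def lwdCnt (ps : List (String × String)) (k : String) : List Int :=
  lwdOutcomes.map (fun o => (ps.count (k, o) : Int))

def lwdmove_counter_alt (dd : List ((List (String × List Int)) × String)) : List (String × List Int) :=
  let ps := lwdPairs dd
  (PySem.List.dedup (ps.map Prod.fst)).map (fun k => (k, lwdCnt ps k))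

-- ===== PRECONDITION & SPEC =====
-- Pre_ excludes exactly the inputs where both Pythons raise KeyError: an entry whose outcome is one
-- of the four counted strings but whose first component lacks the key "moves".
def Pre_lwdmove_counter (dd : List ((List (String × List Int)) × String)) : Prop :=
  ∀ d ∈ dd, d.2 ∈ (["win", "lose", "draw", "cont"] : List String) → "moves" ∈ d.1.map Prod.fst
instance (dd : List ((List (String × List Int)) × String)) : Decidable (Pre_lwdmove_counter dd) := by
  unfold Pre_lwdmove_counter; infer_instance
def pvWitness_lwdmove_counter : (List ((List (String × List Int)) × String)) :=
  [([("moves", [1, 2])], "win"), ([("moves", [1])], "lose"), ([], "other")]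
def Spec_lwdmove_counter (dd : List ((List (String × List Int)) × String)) (out : List (String × List Int)) : Prop := out = lwdmove_counter_alt dd
instance (dd : List ((List (String × List Int)) × String)) (out : List (String × List Int)) : Decidable (Spec_lwdmove_counter dd out) := by unfold Spec_lwdmove_counter; infer_instance

-- ===== CLAIM (what is proved, stated in full; the proofs are below) =====
def Claim_equal_lwdmove_counter : Prop := ∀ (dd : List ((List (String × List Int)) × String)), Dom_lwdmove_counter dd → Pre_lwdmove_counter dd → Spec_lwdmove_counter dd (lwdmove_counter dd)

-- ===== LEMMAS AND PROOFS =====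

-- proof-side uniform view of A's loop body
def lwdSlot (t : String) : Nat :=
  if t = "win" then 0 else if t = "lose" then 1 else if t = "draw" then 2 else 3

def lwdBump (i : Nat) (l : List Int) : List Int := l.set i (l.getD i 0 + 1)

def lwdUnit (i : Nat) : List Int := List.set [0, 0, 0, 0] i 1

def lwdStep2 (r : PySem.Dict String (List Int)) (p : String × String) :
    PySem.Dict String (List Int) :=
  r.insert p.1 (if r.contains p.1 then lwdBump (lwdSlot p.2) (r.getD p.1 []) else lwdUnit (lwdSlot p.2))

theorem lwd_fold_eq (dd : List ((List (String × List Int)) × String)) :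
    ∀ r : PySem.Dict String (List Int),
      dd.foldl lwdStepA r = (lwdPairs dd).foldl lwdStep2 r := by
  induction dd with
  | nil => intro r; rfl
  | cons d dd ih =>
    intro r
    have hstep : lwdStepA r d =
        (if d.2 ∈ lwdOutcomes then
          match (PySem.Dict.mk d.1).getD "moves" [] with
          | [] => r
          | m :: _ => lwdStep2 r (PySem.Int.toStr m, d.2)
        else r) := by
      by_cases h1 : d.2 = "win"
      · simp only [lwdStepA, lwdStep2, lwdSlot, lwdUnit, lwdBump, lwdOutcomes, h1,
          PySem.Dict.modify, List.mem_cons, true_or, if_true]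
        cases (PySem.Dict.mk d.1).getD "moves" [] with
        | nil => rfl
        | cons m tl => by_cases hc : r.contains (PySem.Int.toStr m) = true <;> simp [hc]
      · by_cases h2 : d.2 = "lose"
        · simp only [lwdStepA, lwdStep2, lwdSlot, lwdUnit, lwdBump, lwdOutcomes, h2,
            PySem.Dict.modify, List.mem_cons, or_true, true_or, if_true]
          cases (PySem.Dict.mk d.1).getD "moves" [] with
          | nil => simp
          | cons m tl => by_cases hc : r.contains (PySem.Int.toStr m) = true <;> simp [hc]
        · by_cases h3 : d.2 = "draw"
          · simp only [lwdStepA, lwdStep2, lwdSlot, lwdUnit, lwdBump, lwdOutcomes, h3,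
              PySem.Dict.modify, List.mem_cons, or_true, true_or, if_true]
            cases (PySem.Dict.mk d.1).getD "moves" [] with
            | nil => simp
            | cons m tl => by_cases hc : r.contains (PySem.Int.toStr m) = true <;> simp [hc]
          · by_cases h4 : d.2 = "cont"
            · simp only [lwdStepA, lwdStep2, lwdSlot, lwdUnit, lwdBump, lwdOutcomes, h4, PySem.Dict.modify, List.mem_cons, or_true, true_or, if_true]
              cases (PySem.Dict.mk d.1).getD "moves" [] with
              | nil => simp
              | cons m tl => by_cases hc : r.contains (PySem.Int.toStr m) = true <;> simp [hc]
            · simp [lwdStepA, lwdOutcomes, h1, h2, h3, h4]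
    simp only [List.foldl_cons, lwdPairs, List.filterMap_cons, hstep]
    by_cases hmem : d.2 ∈ lwdOutcomes
    · simp only [hmem, if_true]
      cases (PySem.Dict.mk d.1).getD "moves" [] with
      | nil => simpa [lwdPairs] using ih _
      | cons m _ => simpa [lwdPairs] using ih _
    · simp only [hmem, if_false]
      simpa [lwdPairs] using ih r

-- every pair produced by the comprehension carries a counted outcome
theorem lwd_pairs_tag (dd : List ((List (String × List Int)) × String))
    (p : String × String) (hp : p ∈ lwdPairs dd) : p.2 ∈ lwdOutcomes := by
  simp only [lwdPairs, List.mem_filterMap] at hp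
  obtain ⟨d, _, hd⟩ := hp
  by_cases hmem : d.2 ∈ lwdOutcomes
  · simp only [hmem, if_true] at hd
    cases hm : (PySem.Dict.mk d.1).getD "moves" [] with
    | nil => rw [hm] at hd; cases hd
    | cons m _ => rw [hm] at hd; cases hd; simpa using hmem
  · simp [hmem] at hd

def lwdAdd (v c : List Int) : List Int := List.zipWith (· + ·) v c

theorem lwd_cnt_cons_ne (P : List (String × String)) (k k₀ t : String) (h : k ≠ k₀) :
    lwdCnt ((k₀, t) :: P) k = lwdCnt P k := by
  simp [lwdCnt, lwdOutcomes, Prod.ext_iff, h.symm]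

theorem lwd_cnt_cons_self (P : List (String × String)) (k t : String) (ht : t ∈ lwdOutcomes) :
    lwdCnt ((k, t) :: P) k = lwdBump (lwdSlot t) (lwdCnt P k) := by
  simp only [lwdOutcomes, List.mem_cons, List.not_mem_nil, or_false] at ht
  rcases ht with h | h | h | h <;> subst h <;>
    simp [lwdCnt, lwdBump, lwdSlot, lwdOutcomes, List.count_cons, Prod.ext_iff]

theorem lwd_add_bump (v c : List Int) (i : Nat) (hv : v.length = 4) (hc : c.length = 4)
    (hi : i < 4) : lwdAdd (lwdBump i v) c = lwdAdd v (lwdBump i c) := by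
  match v, hv with
  | [a, b, e, f], _ =>
    match c, hc with
    | [x, y, z, w], _ =>
      interval_cases i <;> simp [lwdAdd, lwdBump] <;> omega

theorem lwd_add_unit (c : List Int) (i : Nat) (hc : c.length = 4) (hi : i < 4) :
    lwdAdd (lwdUnit i) c = lwdBump i c := by
  match c, hc with
  | [x, y, z, w], _ => interval_cases i <;> simp [lwdAdd, lwdUnit, lwdBump] <;> omega

theorem lwd_cnt_length (P : List (String × String)) (k : String) : (lwdCnt P k).length = 4 := by
  simp [lwdCnt, lwdOutcomes]

theorem lwd_slot_lt (t : String) : lwdSlot t < 4 := by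
  unfold lwdSlot; split_ifs <;> omega

theorem lwd_getD_fold (k : String) (P : List (String × String))
    (hP : ∀ p ∈ P, p.2 ∈ lwdOutcomes) :
    ∀ r : PySem.Dict String (List Int), (∀ v, r.get? k = some v → v.length = 4) →
      (P.foldl lwdStep2 r).getD k [] =
        match r.get? k with
        | some v => lwdAdd v (lwdCnt P k)
        | none => if k ∈ P.map Prod.fst then lwdCnt P k else [] := by
  induction P with
  | nil =>
    intro r hr
    cases hv : r.get? k with
    | none => simp [PySem.Dict.getD_eq_get?_getD, hv]
    | some v =>
      have h4 := hr v hv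
      simp only [List.foldl_nil, PySem.Dict.getD_eq_get?_getD, hv, Option.getD_some]
      match v, h4 with
      | [a, b, e, f], _ => simp [lwdAdd, lwdCnt, lwdOutcomes]
  | cons p P ih =>
    intro r hr
    obtain ⟨k₀, t⟩ := p
    have ht : t ∈ lwdOutcomes := hP (k₀, t) (List.mem_cons_self ..)
    have hP' : ∀ p ∈ P, p.2 ∈ lwdOutcomes := fun p hp => hP p (List.mem_cons_of_mem _ hp)
    simp only [List.foldl_cons]
    by_cases hk : k = k₀
    · subst hk
      cases hv : r.get? k with
      | some v =>
        have h4 := hr v hv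
        have hcont : r.contains k = true := by
          rw [PySem.Dict.contains_eq_isSome_get?, hv]; rfl
        have hgd : r.getD k [] = v := PySem.Dict.getD_of_get?_eq_some _ _ hv
        have hstep : lwdStep2 r (k, t) = r.insert k (lwdBump (lwdSlot t) v) := by
          simp [lwdStep2, hcont, hgd]
        rw [hstep, ih hP' _ (fun w hw => by
          rw [PySem.Dict.get?_insert_self] at hw
          cases hw
          simp [lwdBump, h4])]
        rw [PySem.Dict.get?_insert_self, lwd_cnt_cons_self P k t ht]
        show lwdAdd (lwdBump (lwdSlot t) v) (lwdCnt P k) = lwdAdd v (lwdBump (lwdSlot t) (lwdCnt P k))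
        exact lwd_add_bump v (lwdCnt P k) (lwdSlot t) h4 (lwd_cnt_length P k) (lwd_slot_lt t)
      | none =>
        have hcont : r.contains k = false := by
          rw [PySem.Dict.contains_eq_isSome_get?, hv]; rfl
        have hstep : lwdStep2 r (k, t) = r.insert k (lwdUnit (lwdSlot t)) := by
          simp [lwdStep2, hcont]
        rw [hstep, ih hP' _ (fun w hw => by
          rw [PySem.Dict.get?_insert_self] at hw
          cases hw
          simp only [lwdUnit]
          simp [List.length_set])]
        rw [PySem.Dict.get?_insert_self, lwd_cnt_cons_self P k t ht]
        show lwdAdd (lwdUnit (lwdSlot t)) (lwdCnt P k) =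
          if k ∈ k :: List.map Prod.fst P then lwdBump (lwdSlot t) (lwdCnt P k) else []
        rw [if_pos (List.mem_cons_self ..)]
        exact lwd_add_unit (lwdCnt P k) (lwdSlot t) (lwd_cnt_length P k) (lwd_slot_lt t)
    · have hstep : (lwdStep2 r (k₀, t)).get? k = r.get? k := by
        simp only [lwdStep2]
        rw [PySem.Dict.get?_insert]
        simp [hk]
      rw [ih hP' _ (fun w hw => hr w (by rwa [hstep] at hw))]
      rw [hstep, lwd_cnt_cons_ne P k k₀ t hk]
      cases r.get? k with
      | some v => rfl
      | none =>
        rw [List.map_cons]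
        by_cases hmem : k ∈ List.map Prod.fst P
        · rw [if_pos hmem, if_pos (List.mem_cons_of_mem _ hmem)]
        · rw [if_neg hmem, if_neg (by simp [List.mem_cons, hk, hmem])]

-- ===== VERDICT (by name: the statement is the Claim_ definition above) =====
theorem lwdmove_counter_spec : Claim_equal_lwdmove_counter := by
  intro dd _ _
  unfold Spec_lwdmove_counter lwdmove_counter
  rw [lwd_fold_eq dd PySem.Dict.empty]
  have hstep2 : lwdStep2 = fun (r : PySem.Dict String (List Int)) (p : String × String) =>
      r.insert p.1 ((fun r p => if r.contains p.1 then lwdBump (lwdSlot p.2) (r.getD p.1 [])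
        else lwdUnit (lwdSlot p.2)) r p) := rfl
  have hkeys : ((lwdPairs dd).foldl lwdStep2 PySem.Dict.empty).keys =
      PySem.Set.ofList ((lwdPairs dd).map Prod.fst) := by
    rw [hstep2, PySem.Dict.keys_foldl_insert_key (lwdPairs dd) Prod.fst _ PySem.Dict.empty]
    simp [PySem.Set.update_nil_left]
  have hnodup : ((lwdPairs dd).foldl lwdStep2 PySem.Dict.empty).keys.Nodup := by
    rw [hstep2]
    exact PySem.Dict.nodup_keys_foldl_insert_key (lwdPairs dd) Prod.fst _ PySem.Dict.empty (by simp)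
  rw [PySem.Dict.items_eq_map_keys _ hnodup ([] : List Int), hkeys]
  show _ = List.map (fun k => (k, lwdCnt (lwdPairs dd) k))
    (PySem.List.dedup ((lwdPairs dd).map Prod.fst))
  rw [PySem.List.dedup_eq_ofList]
  apply List.map_congr_left
  intro k hk
  have hkmem : k ∈ (lwdPairs dd).map Prod.fst := (PySem.Set.mem_ofList _ _).mp hk
  have hfold := lwd_getD_fold k (lwdPairs dd) (fun p hp => lwd_pairs_tag dd p hp)
    PySem.Dict.empty (fun v hv => by simp [PySem.Dict.get?_empty] at hv)
  rw [PySem.Dict.get?_empty] at hfold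
  simp only [hfold, hkmem, if_pos]
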